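-- pv_equiv track=rewrite | github.com/AegriS0mnia/PythonGenerationTasks | StepikCourse3/6.5.23.py | flip_dict
-- ===== SOURCE A (Python) =====
-- from collections import defaultdict
--
-- def flip_dict(_dict):
--     new_keys = []
--     for iterable in _dict.values():
--         for elem in iterable:
--             if elem not in new_keys:
--                 new_keys.append(elem)
--     flipped_dict = {key: [] for key in new_keys}
--
--     for key in flipped_dict:
--         for k in _dict:
--             if key in _dict[k]:
--                 flipped_dict[key].extend([k] * _dict[k].count(key))
--
--     return defaultdict(list, flipped_dict.items())
-- ===== SOURCE B (Python) =====
-- from collections import defaultdict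
--
-- def flip_dict(_dict):
--     flipped = {}
--     for key, values in _dict.items():
--         for elem in values:
--             flipped.setdefault(elem, []).append(key)
--     return defaultdict(list, flipped)
-- ===== Notes on version B (the rewrite author's own statement) =====
-- stated objective: faster
-- what changed: One pass over the items appending each key into a dict bucket keyed by element, instead of first deduplicating all elements with a list-membership scan and then re-scanning the whole dict (with a count pass) once per distinct element.
import Mathlib
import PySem

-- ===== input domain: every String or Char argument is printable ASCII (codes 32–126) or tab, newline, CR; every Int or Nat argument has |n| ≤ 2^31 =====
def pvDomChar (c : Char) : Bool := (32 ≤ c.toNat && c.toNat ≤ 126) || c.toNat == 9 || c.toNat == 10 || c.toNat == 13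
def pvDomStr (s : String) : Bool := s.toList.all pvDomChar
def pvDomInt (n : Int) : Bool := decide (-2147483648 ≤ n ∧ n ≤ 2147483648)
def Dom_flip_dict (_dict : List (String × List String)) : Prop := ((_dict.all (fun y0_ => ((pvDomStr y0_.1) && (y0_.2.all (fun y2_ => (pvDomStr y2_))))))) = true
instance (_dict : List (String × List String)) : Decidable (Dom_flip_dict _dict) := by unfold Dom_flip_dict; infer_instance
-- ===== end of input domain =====

-- ===== PORT A =====
-- B inverts the dict in one pass over the items; A's two-phase scan (dedup by list
-- membership, then one full re-scan of the dict per distinct element) is replaced.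
def flip_dict (_dict : List (String × List String)) : List (String × List String) :=
  -- new_keys: first-seen-order list of all elements of all value lists
  let new_keys : List String :=
    _dict.foldl (fun nk kv =>
      kv.2.foldl (fun nk elem => if elem ∈ nk then nk else nk ++ [elem]) nk) []
  -- flipped_dict = {key: [] for key in new_keys} (keys are distinct), then each key's
  -- list is extended independently; `_dict[k]` is a dict lookup (k is always a key,
  -- so the getD default is never used).
  new_keys.map (fun key =>
    (key, _dict.foldl (fun acc kv =>
      let v := (PySem.Dict.mk _dict).getD kv.1 []
      if key ∈ v then acc ++ List.replicate (v.count key) kv.1 else acc) []))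

-- ===== PORT B =====
def flip_dict_alt (_dict : List (String × List String)) : List (String × List String) :=
  (_dict.foldl (fun out kv =>
      kv.2.foldl (fun out elem => out.modify elem [] (· ++ [kv.1])) out)
    (PySem.Dict.empty : PySem.Dict String (List String))).items

-- ===== PRECONDITION & SPEC =====
-- A Python dict has pairwise-distinct keys; an association list with a duplicated key
-- represents no dict (A reads `_dict[k]` by key and could never see a shadowed entry).
def Pre_flip_dict (_dict : List (String × List String)) : Prop :=
  (_dict.map Prod.fst).Nodup
instance (_dict : List (String × List String)) : Decidable (Pre_flip_dict _dict) := by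
  unfold Pre_flip_dict; infer_instance
def pvWitness_flip_dict : (List (String × List String)) :=
  [("a", ["x", "y", "x"]), ("b", ["x"])]
def Spec_flip_dict (_dict : List (String × List String)) (out : List (String × List String)) : Prop := out = flip_dict_alt _dict
instance (_dict : List (String × List String)) (out : List (String × List String)) : Decidable (Spec_flip_dict _dict out) := by unfold Spec_flip_dict; infer_instance

-- ===== CLAIM (what is proved, stated in full; the proofs are below) =====
def Claim_equal_flip_dict : Prop := ∀ (_dict : List (String × List String)), Dom_flip_dict _dict → Pre_flip_dict _dict → Spec_flip_dict _dict (flip_dict _dict)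

-- ===== LEMMAS AND PROOFS =====

-- the items of d as a flat list of (element, key) pairs, in traversal order
def pvPairs (d : List (String × List String)) : List (String × String) :=
  d.flatMap (fun kv => kv.2.map (fun e => (e, kv.1)))

-- the bucket of element e: every key, once per occurrence of e in its value list
def pvBucket (d : List (String × List String)) (e : String) : List String :=
  ((pvPairs d).filter (fun pr => pr.1 == e)).map Prod.snd

-- the common normal form of both results
def pvFlip (d : List (String × List String)) : List (String × List String) :=
  (PySem.Set.ofList (d.flatMap (fun kv => kv.2))).map (fun e => (e, pvBucket d e))

-- a double fold over the entries and their value lists is a single fold over pvPairs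
theorem foldl_pvPairs {α : Type} (d : List (String × List String))
    (f : α → String × String → α) (init : α) :
    (pvPairs d).foldl f init
      = d.foldl (fun a kv => kv.2.foldl (fun a e => f a (e, kv.1)) a) init := by
  unfold pvPairs
  rw [List.flatMap_def, List.foldl_flatten, List.foldl_map]
  exact PySem.List.foldl_congr_mem _ _ _ _ (by intro a kv _; rw [List.foldl_map])

theorem foldl_flatMap_snd {α : Type} (d : List (String × List String))
    (f : α → String → α) (init : α) :
    (d.flatMap (fun kv => kv.2)).foldl f init
      = d.foldl (fun a kv => kv.2.foldl f a) init := by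
  rw [List.flatMap_def, List.foldl_flatten, List.foldl_map]

theorem pairs_fst (d : List (String × List String)) :
    (pvPairs d).map Prod.fst = d.flatMap (fun kv => kv.2) := by
  unfold pvPairs
  rw [List.map_flatMap]
  simp [List.map_map, Function.comp_def]

theorem B_eq_pvFlip (d : List (String × List String)) : flip_dict_alt d = pvFlip d := by
  unfold flip_dict_alt
  have hfold :
      d.foldl (fun out kv =>
          kv.2.foldl (fun out elem => out.modify elem [] (· ++ [kv.1])) out)
        (PySem.Dict.empty : PySem.Dict String (List String))
        = (pvPairs d).foldl (fun out pr => out.modify pr.1 [] (· ++ [pr.2]))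
            PySem.Dict.empty := by
    rw [foldl_pvPairs]
  rw [hfold]
  have hnd : ((pvPairs d).foldl (fun out pr => out.modify pr.1 [] (· ++ [pr.2]))
      (PySem.Dict.empty : PySem.Dict String (List String))).keys.Nodup :=
    PySem.Dict.nodup_keys_foldl_modify_key (pvPairs d) Prod.fst []
      (fun _ pr => (· ++ [pr.2])) PySem.Dict.empty (by simp)
  rw [PySem.Dict.items_eq_map_keys _ hnd []]
  have hkeys : ((pvPairs d).foldl (fun out pr => out.modify pr.1 [] (· ++ [pr.2]))
      (PySem.Dict.empty : PySem.Dict String (List String))).keys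
        = PySem.Set.ofList (d.flatMap (fun kv => kv.2)) := by
    rw [PySem.Dict.keys_foldl_modify_key (key := Prod.fst)]
    rw [PySem.Set.ofList_eq_foldl, PySem.Set.update, ← pairs_fst d]
    rfl
  rw [hkeys]
  unfold pvFlip
  refine List.map_congr_left (fun e _ => ?_)
  rw [PySem.Dict.getD_foldl_modify_append]
  simp [pvBucket]

theorem bucket_flat (d : List (String × List String)) (key : String) :
    d.flatMap (fun kv => List.replicate (kv.2.count key) kv.1) = pvBucket d key := by
  unfold pvBucket pvPairs
  rw [List.filter_flatMap, List.map_flatMap]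
  refine List.flatMap_congr (fun kv _ => ?_)
  rw [List.filter_map, List.map_map, List.count_eq_length_filter]
  simp [Function.comp_def, List.map_const']

theorem A_eq_pvFlip (d : List (String × List String)) (hpre : Pre_flip_dict d) :
    flip_dict d = pvFlip d := by
  unfold flip_dict pvFlip
  have hkeys :
      d.foldl (fun nk kv =>
          kv.2.foldl (fun nk elem => if elem ∈ nk then nk else nk ++ [elem]) nk) []
        = PySem.Set.ofList (d.flatMap (fun kv => kv.2)) := by
    rw [PySem.Set.ofList_eq_foldl, foldl_flatMap_snd]
    refine PySem.List.foldl_congr_mem _ _ _ _ (by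
      intro nk kv _
      refine PySem.List.foldl_congr_mem _ _ _ _ (by
        intro s e _
        simp [PySem.Set.add, List.contains_eq_mem]))
  rw [hkeys]
  refine List.map_congr_left (fun key _ => ?_)
  have hval : ∀ kv ∈ d, (PySem.Dict.mk d).getD kv.1 [] = kv.2 := by
    intro kv hmem
    exact PySem.Dict.getD_of_mem_items _ (by simpa using hmem) (by simpa using hpre) []
  have hstep :
      d.foldl (fun acc kv =>
          let v := (PySem.Dict.mk d).getD kv.1 []
          if key ∈ v then acc ++ List.replicate (v.count key) kv.1 else acc) []
        = d.foldl (fun acc kv => acc ++ List.replicate (kv.2.count key) kv.1) [] := by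
    refine PySem.List.foldl_congr_mem _ _ _ _ (by
      intro acc kv hmem
      simp only [hval kv hmem]
      by_cases h : key ∈ kv.2
      · simp [h]
      · simp [h, List.count_eq_zero.mpr h])
  rw [hstep, PySem.List.foldl_append_eq_flatMap, List.nil_append, bucket_flat]

-- ===== VERDICT (by name: the statement is the Claim_ definition above) =====
theorem flip_dict_spec : Claim_equal_flip_dict := by
  intro d _ hpre
  unfold Spec_flip_dict
  rw [A_eq_pvFlip d hpre, B_eq_pvFlip d]
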